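-- pv_equiv track=rewrite | github.com/bharath13211/Pikachu | pikachu.py | move_W_up
-- ===== SOURCE A (Python) =====
-- import copy
--
-- def move_W_up(board, player, N, r, c):
--     temp_board = copy.deepcopy(board)
--     if r < N  and r >= 2 and c < N and c >= 0 and temp_board[r][c] == 'W':
--         for j in range(1, r):
--             if (temp_board[j][c] == 'b' or temp_board[j][c] == 'B') and temp_board[j - 1][c] == '.':
--                 list = []
--                 for k in range(j, r):
--                     if temp_board[k][c] == 'w' or temp_board[k][c] == 'W':
--                         list.append('N')
--                     elif temp_board[k][c] == '.':
--                         list.append('Y')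
--                 if 'N' not in list:
--                     temp_board[j - 1][c] = 'W'
--                     temp_board[j][c] = '.'
--                     temp_board[r][c] = '.'
--     return temp_board
-- ===== SOURCE B (Python) =====
-- import copy
--
-- def _suffix_whites(cells):
--     # sfx[i] = True iff any of cells[i:] is 'w' or 'W' (one backward pass)
--     sfx = []
--     seen = False
--     for x in reversed(cells):
--         seen = seen or x == 'w' or x == 'W'
--         sfx.append(seen)
--     sfx.reverse()
--     return sfx
--
-- def move_W_up(board, player, N, r, c):
--     temp_board = copy.deepcopy(board)
--     if r < N and r >= 2 and c < N and c >= 0 and temp_board[r][c] == 'W':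
--         col = [temp_board[i][c] for i in range(r)]
--         sfx = _suffix_whites(col)
--         moved = False
--         for j in range(1, r):
--             if (col[j] == 'b' or col[j] == 'B') and col[j - 1] == '.' and not sfx[j]:
--                 col[j - 1] = 'W'
--                 col[j] = '.'
--                 moved = True
--         for i in range(r):
--             temp_board[i][c] = col[i]
--         if moved:
--             temp_board[r][c] = '.'
--     return temp_board
-- ===== Notes on version B (the rewrite author's own statement) =====
-- stated objective: faster
-- what changed: B extracts column c once, precomputes a suffix 'white below' flag array in one backward pass (replacing A's per-row inner rescan of the column), runs the same sequential move loop on the column, and writes it back.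
import Mathlib
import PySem

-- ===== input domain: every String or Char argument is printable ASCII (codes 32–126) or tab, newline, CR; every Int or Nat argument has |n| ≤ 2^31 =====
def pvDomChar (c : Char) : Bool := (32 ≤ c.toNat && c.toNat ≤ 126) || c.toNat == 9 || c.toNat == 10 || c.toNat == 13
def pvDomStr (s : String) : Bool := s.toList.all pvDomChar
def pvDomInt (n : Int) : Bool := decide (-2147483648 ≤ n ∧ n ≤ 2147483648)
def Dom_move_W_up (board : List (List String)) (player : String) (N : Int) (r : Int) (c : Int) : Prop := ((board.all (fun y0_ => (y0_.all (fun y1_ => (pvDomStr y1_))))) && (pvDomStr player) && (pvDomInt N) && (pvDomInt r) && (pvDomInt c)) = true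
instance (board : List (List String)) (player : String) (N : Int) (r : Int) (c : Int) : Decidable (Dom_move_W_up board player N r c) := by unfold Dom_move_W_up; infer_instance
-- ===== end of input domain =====

-- B replaces A's per-row rescan of the column below by a suffix "white below" flag array built
-- in one backward pass over the extracted column, then writes the column back.
-- Neither implementation mutates its arguments (A deepcopies); equivalence is about the return value.

-- shared 2D-cell helpers (Python's temp_board[i][c] read/write; the indices used are the
-- nonnegative in-range Nat indices guaranteed by the guard + Pre_)
def getCell (b : List (List String)) (i c : Nat) : String := (b.getD i []).getD c ""
def setCell (b : List (List String)) (i c : Nat) (v : String) : List (List String) :=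
  b.set i ((b.getD i []).set c v)

-- ===== PORT A =====
-- the inner 'for k in range(j, r)' building 'list' by appending 'N'/'Y'
def scanStep (acc : List String) (x : String) : List String :=
  if x = "w" ∨ x = "W" then acc ++ ["N"] else if x = "." then acc ++ ["Y"] else acc

def innerList (tb : List (List String)) (j R C : Nat) : List String :=
  ((List.range (R - j)).map (fun dk => getCell tb (j + dk) C)).foldl scanStep []

def stepA (R C : Nat) (tb : List (List String)) (j : Nat) : List (List String) :=
  if (getCell tb j C = "b" ∨ getCell tb j C = "B") ∧ getCell tb (j - 1) C = "." then
    if "N" ∈ innerList tb j R C then tb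
    else setCell (setCell (setCell tb (j - 1) C "W") j C ".") R C "."
  else tb

def move_W_up (board : List (List String)) (player : String) (N : Int) (r : Int) (c : Int) : List (List String) :=
  if r < N ∧ 2 ≤ r ∧ c < N ∧ 0 ≤ c ∧ getCell board r.toNat c.toNat = "W" then
    (List.range' 1 (r.toNat - 1)).foldl (stepA r.toNat c.toNat) board
  else board

-- ===== PORT B =====
def isWhite (x : String) : Bool := x == "w" || x == "W"

-- Source B's _suffix_whites (reversed scan + reverse, transcribed as the right-to-left structural pass)
def suffixWhites : List String → List Bool
  | [] => []
  | x :: xs => (isWhite x || (suffixWhites xs).headD false) :: suffixWhites xs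

def stepB (sfx : List Bool) (st : List String × Bool) (j : Nat) : List String × Bool :=
  if (st.1.getD j "" = "b" ∨ st.1.getD j "" = "B") ∧ st.1.getD (j - 1) "" = "." ∧ sfx.getD j false = false then
    ((st.1.set (j - 1) "W").set j ".", true)
  else st

-- 'for i in range(r): temp_board[i][c] = col[i]'
def writeBack (board : List (List String)) (C : Nat) (col : List String) (n : Nat) : List (List String) :=
  (List.range n).foldl (fun tb i => setCell tb i C (col.getD i "")) board

def move_W_up_alt (board : List (List String)) (player : String) (N : Int) (r : Int) (c : Int) : List (List String) :=
  if r < N ∧ 2 ≤ r ∧ c < N ∧ 0 ≤ c ∧ getCell board r.toNat c.toNat = "W" then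
    let R := r.toNat
    let C := c.toNat
    let col0 := (List.range R).map (fun i => getCell board i C)
    let res := (List.range' 1 (R - 1)).foldl (stepB (suffixWhites col0)) (col0, false)
    let tb1 := writeBack board C res.1 R
    if res.2 then setCell tb1 R C "." else tb1
  else board

-- ===== PRECONDITION & SPEC =====
-- Pre_ excludes exactly the column-indexing failures: A raises IndexError at board[r][c] when the
-- four guard comparisons hold but row r is missing or short, and, once the 'W' guard fires, A reads
-- board[j][c] for every j in 1..r-1 (and board[j-1][c] behind a short-circuit); B's column
-- extraction reads all rows 0..r-1, so the one row A can skip by short-circuit (row 0, when row 1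
-- is never 'b'/'B') is excluded too — on such boards B itself raises IndexError.
def Pre_move_W_up (board : List (List String)) (player : String) (N : Int) (r : Int) (c : Int) : Prop :=
  (r < N ∧ 2 ≤ r ∧ c < N ∧ 0 ≤ c) →
    (r.toNat < board.length ∧ c.toNat < (board.getD r.toNat []).length ∧
      ((board.getD r.toNat []).getD c.toNat "" = "W" →
        ∀ i < r.toNat, c.toNat < (board.getD i []).length))
instance (board : List (List String)) (player : String) (N : Int) (r : Int) (c : Int) : Decidable (Pre_move_W_up board player N r c) := by unfold Pre_move_W_up; infer_instance

def pvWitness_move_W_up : List (List String) × String × Int × Int × Int :=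
  ([["."], ["b"], ["W"]], "W", 3, 2, 0)

def Spec_move_W_up (board : List (List String)) (player : String) (N : Int) (r : Int) (c : Int) (out : List (List String)) : Prop := out = move_W_up_alt board player N r c
instance (board : List (List String)) (player : String) (N : Int) (r : Int) (c : Int) (out : List (List String)) : Decidable (Spec_move_W_up board player N r c out) := by unfold Spec_move_W_up; infer_instance

-- ===== CLAIM (what is proved, stated in full; the proofs are below) =====
def Claim_equal_move_W_up : Prop := ∀ (board : List (List String)) (player : String) (N : Int) (r : Int) (c : Int), Dom_move_W_up board player N r c → Pre_move_W_up board player N r c → Spec_move_W_up board player N r c (move_W_up board player N r c)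

-- ===== LEMMAS AND PROOFS =====

-- cell-access algebra
lemma getD_set' {α : Type} (l : List α) (i k : Nat) (v d : α) :
    (l.set i v).getD k d = if k = i ∧ i < l.length then v else l.getD k d := by
  simp only [List.getD_eq_getElem?_getD, List.getElem?_set]
  split_ifs with h1 h2 h3 <;> simp_all

lemma length_setCell (b : List (List String)) (i c : Nat) (v : String) :
    (setCell b i c v).length = b.length := by
  simp [setCell]

lemma rowlen_setCell (b : List (List String)) (i c : Nat) (v : String) (k : Nat) :
    ((setCell b i c v).getD k []).length = (b.getD k []).length := by
  simp only [setCell, getD_set']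
  split_ifs with h <;> simp_all

lemma getCell_setCell (b : List (List String)) (i c : Nat) (v : String) (k c2 : Nat) :
    getCell (setCell b i c v) k c2 =
      if k = i ∧ c2 = c ∧ i < b.length ∧ c < (b.getD i []).length then v
      else getCell b k c2 := by
  simp only [getCell, setCell, getD_set']
  by_cases hk : k = i
  · subst hk
    by_cases hi : k < b.length
    · rw [if_pos ⟨rfl, hi⟩, getD_set']
      split_ifs <;> tauto
    · rw [if_neg (by tauto), if_neg (by tauto)]
  · rw [if_neg (by tauto), if_neg (by tauto)]

lemma getD_map_range {α : Type} (f : Nat → α) (n i : Nat) (d : α) (h : i < n) :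
    (((List.range n).map f).getD i d) = f i := by
  rw [List.getD_eq_getElem _ _ (by simpa using h)]
  simp

lemma ext2d (a b : List (List String)) (h1 : a.length = b.length)
    (h2 : ∀ i, (a.getD i []).length = (b.getD i []).length)
    (h3 : ∀ i c2, (a.getD i []).getD c2 "" = (b.getD i []).getD c2 "") : a = b := by
  apply List.ext_getElem h1
  intro i hi hi'
  apply List.ext_getElem
  · have := h2 i
    rwa [List.getD_eq_getElem _ _ hi, List.getD_eq_getElem _ _ hi'] at this
  · intro j hj hj'
    have := h3 i j
    rw [List.getD_eq_getElem _ _ hi, List.getD_eq_getElem _ _ hi'] at this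
    rwa [List.getD_eq_getElem _ _ hj, List.getD_eq_getElem _ _ hj'] at this

-- A's inner scan: membership of 'N' means a white piece in rows [j, R)
lemma mem_scan (xs acc : List String) :
    "N" ∈ xs.foldl scanStep acc ↔ "N" ∈ acc ∨ ∃ x ∈ xs, x = "w" ∨ x = "W" := by
  induction xs generalizing acc with
  | nil => simp
  | cons x xs ih =>
    simp only [List.foldl_cons, ih, scanStep]
    split_ifs with h1 h2 <;> simp_all

lemma mem_innerList (tb : List (List String)) (j R C : Nat) :
    "N" ∈ innerList tb j R C ↔
      ∃ k, j ≤ k ∧ k < R ∧ (getCell tb k C = "w" ∨ getCell tb k C = "W") := by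
  rw [innerList, mem_scan]
  simp only [List.mem_map, List.mem_range]
  constructor
  · rintro (h | ⟨x, ⟨dk, hdk, rfl⟩, hx⟩)
    · simp at h
    · exact ⟨j + dk, by omega, by omega, hx⟩
  · rintro ⟨k, h1, h2, h3⟩
    exact Or.inr ⟨getCell tb k C, ⟨k - j, by omega, by rw [Nat.add_sub_cancel' h1]⟩, h3⟩

-- B's suffix flags: sfx[i] says "some white in cells[i:]"
lemma sfx_getD (cs : List String) (i : Nat) :
    (suffixWhites cs).getD i false = (cs.drop i).any isWhite := by
  induction cs generalizing i with
  | nil => simp [suffixWhites]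
  | cons x xs ih =>
    cases i with
    | zero =>
      have h0 := ih 0
      rw [List.getD_eq_getElem?_getD, ← List.head?_eq_getElem?] at h0
      simp only [suffixWhites, List.getD_cons_zero, List.drop_zero] at *
      rw [List.headD_eq_head?_getD, h0]; simp
    | succ n =>
      have := ih n
      rw [List.getD_eq_getElem?_getD] at this
      simp only [suffixWhites, List.getD_eq_getElem?_getD]
      simpa using this

lemma sfx_iff (cs : List String) (i : Nat) :
    (suffixWhites cs).getD i false = true ↔
      ∃ k, i ≤ k ∧ k < cs.length ∧ (cs.getD k "" = "w" ∨ cs.getD k "" = "W") := by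
  rw [sfx_getD, List.any_eq_true]
  constructor
  · rintro ⟨x, hx, hw⟩
    obtain ⟨m, hm, hxm⟩ := List.mem_iff_getElem.mp hx
    rw [List.getElem_drop] at hxm
    refine ⟨i + m, by omega, by simp at hm; omega, ?_⟩
    rw [List.getD_eq_getElem _ _ (by simp at hm; omega), hxm]
    simpa [isWhite] using hw
  · rintro ⟨k, h1, h2, h3⟩
    refine ⟨cs[k], ?_, ?_⟩
    · exact List.mem_iff_getElem.mpr ⟨k - i, by simp; omega, by rw [List.getElem_drop]; congr 1; omega⟩
    · rw [List.getD_eq_getElem _ _ h2] at h3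
      simp only [isWhite]
      rcases h3 with h | h <;> simp [h]

-- writeBack characterisation
lemma writeBack_succ (board : List (List String)) (C : Nat) (col : List String) (m : Nat) :
    writeBack board C col (m + 1) = setCell (writeBack board C col m) m C (col.getD m "") := by
  rw [writeBack, List.range_succ, List.foldl_append]
  rfl

lemma length_writeBack (board : List (List String)) (C : Nat) (col : List String) (n : Nat) :
    (writeBack board C col n).length = board.length := by
  induction n with
  | zero => rfl
  | succ m ih => rw [writeBack_succ, length_setCell, ih]

lemma rowlen_writeBack (board : List (List String)) (C : Nat) (col : List String) (n k : Nat) :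
    ((writeBack board C col n).getD k []).length = (board.getD k []).length := by
  induction n with
  | zero => rfl
  | succ m ih => rw [writeBack_succ, rowlen_setCell, ih]

lemma getCell_writeBack (board : List (List String)) (C : Nat) (col : List String) (n : Nat)
    (hn : n ≤ board.length) (hC : ∀ i < n, C < (board.getD i []).length) (i c2 : Nat) :
    getCell (writeBack board C col n) i c2 =
      if c2 = C ∧ i < n then col.getD i "" else getCell board i c2 := by
  induction n with
  | zero => simp [writeBack]
  | succ m ih =>
    rw [writeBack_succ, getCell_setCell]
    rw [length_writeBack, rowlen_writeBack]
    rw [ih (by omega) (fun i h => hC i (by omega))]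
    have hCm := hC m (by omega)
    split_ifs <;> first | rfl | omega | tauto

-- the simulation invariant between A's board state and B's (column, moved) state
def SimInv (board : List (List String)) (R C : Nat) (tb : List (List String))
    (col : List String) (moved : Bool) : Prop :=
  tb.length = board.length ∧
  (∀ i, ((tb.getD i []).length = (board.getD i []).length)) ∧
  col.length = R ∧
  (∀ i c2, getCell tb i c2 =
    if c2 = C ∧ i < R then col.getD i ""
    else if c2 = C ∧ i = R then (if moved then "." else "W")
    else getCell board i c2)

lemma sim (board : List (List String)) (R C : Nat)
    (hR : R < board.length) (hC : ∀ i, i ≤ R → C < (board.getD i []).length)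
    (col0 : List String) (hcol0 : col0 = (List.range R).map (fun i => getCell board i C)) :
    ∀ (n j : Nat) (tb : List (List String)) (col : List String) (moved : Bool),
      1 ≤ j → j + n = R → SimInv board R C tb col moved →
      (∀ k, j ≤ k → k < R → col.getD k "" = col0.getD k "") →
      SimInv board R C ((List.range' j n).foldl (stepA R C) tb)
        (((List.range' j n).foldl (stepB (suffixWhites col0)) (col, moved)).1)
        (((List.range' j n).foldl (stepB (suffixWhites col0)) (col, moved)).2) := by
  intro n
  induction n with
  | zero => intro j tb col moved _ _ hInv _; exact hInv
  | succ m ih =>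
    intro j tb col moved hj hjm hInv hAg
    obtain ⟨hL, hRow, hColLen, hE⟩ := hInv
    have hjR : j < R := by omega
    have hcol0len : col0.length = R := by rw [hcol0]; simp
    -- the two reads agree
    have hread : ∀ k, k < R → getCell tb k C = col.getD k "" := by
      intro k hk; rw [hE]; simp [hk]
    -- the scan agrees with the suffix flag
    have hscan : ("N" ∈ innerList tb j R C) ↔ (suffixWhites col0).getD j false = true := by
      rw [mem_innerList, sfx_iff]
      constructor
      · rintro ⟨k, h1, h2, h3⟩
        refine ⟨k, h1, by omega, ?_⟩
        rw [← hAg k h1 h2, ← hread k h2]; exact h3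
      · rintro ⟨k, h1, h2, h3⟩
        refine ⟨k, h1, by omega, ?_⟩
        rw [hread k (by omega), hAg k h1 (by omega)]; exact h3
    rw [List.range'_succ, List.foldl_cons, List.foldl_cons]
    have hstep : SimInv board R C (stepA R C tb j) ((stepB (suffixWhites col0) (col, moved) j).1)
        ((stepB (suffixWhites col0) (col, moved) j).2) ∧
        (∀ k, j + 1 ≤ k → k < R → ((stepB (suffixWhites col0) (col, moved) j).1).getD k "" = col0.getD k "") := by
      rw [stepA, stepB]
      simp only [hread j hjR, hread (j-1) (by omega)]
      by_cases hc : (col.getD j "" = "b" ∨ col.getD j "" = "B") ∧ col.getD (j-1) "" = "."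
      · by_cases hN : (suffixWhites col0).getD j false = true
        · rw [if_pos hc, if_pos (hscan.mpr hN), if_neg (fun hcc => by rw [hcc.2.2] at hN; exact absurd hN (by decide))]
          exact ⟨⟨hL, hRow, hColLen, hE⟩, fun k h1 h2 => hAg k (by omega) h2⟩
        · rw [if_pos hc, if_neg (by rw [hscan]; exact hN),
              if_pos (by exact ⟨hc.1, hc.2, by simpa using hN⟩)]
          have hCj : C < (board.getD j []).length := hC j (by omega)
          have hCj1 : C < (board.getD (j-1) []).length := hC (j-1) (by omega)
          have hCR : C < (board.getD R []).length := hC R (by omega)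
          refine ⟨⟨?_, ?_, ?_, ?_⟩, ?_⟩
          · rw [length_setCell, length_setCell, length_setCell, hL]
          · intro i
            rw [rowlen_setCell, rowlen_setCell, rowlen_setCell, hRow]
          · simp [hColLen]
          · intro i c2
            rw [getCell_setCell, length_setCell, length_setCell,
                rowlen_setCell, rowlen_setCell, hL, hRow,
                getCell_setCell, length_setCell, rowlen_setCell, hL, hRow,
                getCell_setCell, hL, hRow, hE]
            rw [getD_set', getD_set', List.length_set, hColLen]
            rcases eq_or_ne c2 C with rfl | hc2
            · rcases eq_or_ne i R with rfl | hiR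
              · rw [if_pos ⟨rfl, rfl, hR, hCR⟩, if_neg (by omega), if_pos ⟨rfl, rfl⟩]
                rfl
              · rw [if_neg (by tauto)]
                rcases eq_or_ne i j with rfl | hij
                · rw [if_pos ⟨rfl, rfl, by omega, hCj⟩, if_pos ⟨rfl, hjR⟩,
                      if_pos (by constructor <;> [rfl; omega])]
                · rw [if_neg (by tauto)]
                  rcases eq_or_ne i (j - 1) with rfl | hij1
                  · rw [if_pos ⟨rfl, rfl, by omega, hCj1⟩,
                        if_pos (by constructor <;> [rfl; omega]),
                        if_neg (by omega), if_pos ⟨rfl, by omega⟩]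
                  · rw [if_neg (by tauto)]
                    rcases Nat.lt_or_ge i R with hiR2 | hiR2
                    · rw [if_pos ⟨rfl, hiR2⟩, if_pos ⟨rfl, hiR2⟩,
                          if_neg (by tauto), if_neg (by tauto)]
                    · rw [if_neg (by omega), if_neg (by omega),
                          if_neg (by omega), if_neg (by omega)]
            · simp [hc2]
          · intro k h1 h2
            rw [getD_set', getD_set', List.length_set, hColLen]
            rw [if_neg (by omega), if_neg (by omega)]
            exact hAg k (by omega) h2
      · rw [if_neg hc, if_neg (by tauto)]
        exact ⟨⟨hL, hRow, hColLen, hE⟩, fun k h1 h2 => hAg k (by omega) h2⟩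
    exact ih (j+1) _ _ _ (by omega) (by omega) hstep.1 hstep.2

lemma finalEq (board : List (List String)) (R C : Nat)
    (hR : R < board.length) (hC : ∀ i < R, C < (board.getD i []).length)
    (hW : getCell board R C = "W")
    (tbF : List (List String)) (colF : List String) (movedF : Bool)
    (hInv : SimInv board R C tbF colF movedF) :
    tbF = (if movedF then setCell (writeBack board C colF R) R C "."
           else writeBack board C colF R) := by
  obtain ⟨hL, hRow, hColLen, hE⟩ := hInv
  have hCR : C < (board.getD R []).length := by
    by_contra h
    rw [getCell, List.getD_eq_getElem?_getD, List.getElem?_eq_none (by omega)] at hW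
    exact absurd hW (by decide)
  cases movedF with
  | false =>
    have hE2 : ∀ i c2, getCell tbF i c2 =
        if c2 = C ∧ i < R then colF.getD i ""
        else if c2 = C ∧ i = R then "W" else getCell board i c2 := fun i c2 => by rw [hE]; rfl
    rw [if_neg (by decide)]
    apply ext2d
    · rw [hL, length_writeBack]
    · intro i; rw [hRow, rowlen_writeBack]
    · intro i c2
      show getCell tbF i c2 = getCell (writeBack board C colF R) i c2
      rw [hE2, getCell_writeBack board C colF R (by omega) hC]
      by_cases h1 : c2 = C ∧ i < R
      · rw [if_pos h1, if_pos h1]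
      · rw [if_neg h1, if_neg h1]
        by_cases h2 : c2 = C ∧ i = R
        · rw [if_pos h2, h2.1, h2.2]
          exact hW.symm
        · rw [if_neg h2]
  | true =>
    have hE2 : ∀ i c2, getCell tbF i c2 =
        if c2 = C ∧ i < R then colF.getD i ""
        else if c2 = C ∧ i = R then "." else getCell board i c2 := fun i c2 => by rw [hE]; rfl
    rw [if_pos rfl]
    apply ext2d
    · rw [hL, length_setCell, length_writeBack]
    · intro i; rw [hRow, rowlen_setCell, rowlen_writeBack]
    · intro i c2
      show getCell tbF i c2 = getCell (setCell (writeBack board C colF R) R C ".") i c2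
      rw [hE2, getCell_setCell, length_writeBack, rowlen_writeBack,
          getCell_writeBack board C colF R (by omega) hC]
      by_cases h1 : c2 = C ∧ i < R
      · rw [if_pos h1, if_neg (fun hx => by omega), if_pos h1]
      · by_cases h2 : c2 = C ∧ i = R
        · rw [if_neg h1, if_pos h2, if_pos ⟨h2.2, h2.1, hR, hCR⟩]
        · rw [if_neg h1, if_neg h2, if_neg (fun hx => h2 ⟨hx.2.1, hx.1⟩), if_neg h1]
-- ===== VERDICT (by name: the statement is the Claim_ definition above) =====
theorem move_W_up_spec : Claim_equal_move_W_up := by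
  intro board player N r c _ hpre
  show move_W_up board player N r c = move_W_up_alt board player N r c
  rw [move_W_up, move_W_up_alt]
  by_cases hg : r < N ∧ 2 ≤ r ∧ c < N ∧ 0 ≤ c ∧ getCell board r.toNat c.toNat = "W"
  case neg => rw [if_neg hg, if_neg hg]
  rw [if_pos hg, if_pos hg]
  obtain ⟨hg1, hg2, hg3, hg4, hgW⟩ := hg
  obtain ⟨hRlen, hCrow, hAllpre⟩ := hpre ⟨hg1, hg2, hg3, hg4⟩
  have hR2 : 2 ≤ r.toNat := by omega
  have hAll : ∀ i < r.toNat, c.toNat < (board.getD i []).length := hAllpre hgW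
  have hC : ∀ i, i ≤ r.toNat → c.toNat < (board.getD i []).length := by
    intro i hi
    rcases Nat.lt_or_ge i r.toNat with h | h
    · exact hAll i h
    · have : i = r.toNat := by omega
      rw [this]; exact hCrow
  have hInv0 : SimInv board r.toNat c.toNat board
      ((List.range r.toNat).map (fun i => getCell board i c.toNat)) false := by
    refine ⟨rfl, fun _ => rfl, by simp, ?_⟩
    intro i c2
    by_cases h1 : c2 = c.toNat ∧ i < r.toNat
    · rw [if_pos h1, getD_map_range _ _ _ _ h1.2, h1.1]
    · rw [if_neg h1]
      by_cases h2 : c2 = c.toNat ∧ i = r.toNat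
      · rw [if_pos h2, h2.1, h2.2]; exact hgW
      · rw [if_neg h2]
  have hsim := sim board r.toNat c.toNat hRlen hC _ rfl (r.toNat - 1) 1 board _ false
      (le_refl 1) (by omega) hInv0 (fun k _ _ => rfl)
  exact finalEq board r.toNat c.toNat hRlen hAll hgW _ _ _ hsim
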